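-- pv_equiv track=rewrite | github.com/MohanKumar21/mujoco_erricson | irl/main.py | decode_positions
-- ===== SOURCE A (Python) =====
-- def decode_positions(states):
--     """
--     Gets an state from env.render() (int) and returns
--     the taxi position (row, col), the passenger position
--     and the destination location
--
--     :param states: a list of states represented as integers [0-499]
--     :return: taxi_row, taxi_col, pass_code, dest_idx
--     """
--     dest_loc = [state % 4 for state in states]
--     states = [state // 4 for state in states]
--     pass_code = [state % 5 for state in states]
--     states = [state // 5 for state in states]
--     taxi_col = [state % 5 for state in states]
--     states = [state // 5 for state in states]
--     taxi_row = states
--     return taxi_row, taxi_col, pass_code, dest_loc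
-- ===== SOURCE B (Python) =====
-- def decode_positions(states):
--     taxi_row, taxi_col, pass_code, dest_loc = [], [], [], []
--     for s in states:
--         s, d = divmod(s, 4)
--         s, p = divmod(s, 5)
--         s, c = divmod(s, 5)
--         dest_loc.append(d)
--         pass_code.append(p)
--         taxi_col.append(c)
--         taxi_row.append(s)
--     return taxi_row, taxi_col, pass_code, dest_loc
-- ===== Notes on version B (the rewrite author's own statement) =====
-- stated objective: alternative
-- what changed: Fuses A's four staged full-list comprehensions into a single loop that fully decodes each state with divmod in one pass, appending to four accumulator lists.
import Mathlib
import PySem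

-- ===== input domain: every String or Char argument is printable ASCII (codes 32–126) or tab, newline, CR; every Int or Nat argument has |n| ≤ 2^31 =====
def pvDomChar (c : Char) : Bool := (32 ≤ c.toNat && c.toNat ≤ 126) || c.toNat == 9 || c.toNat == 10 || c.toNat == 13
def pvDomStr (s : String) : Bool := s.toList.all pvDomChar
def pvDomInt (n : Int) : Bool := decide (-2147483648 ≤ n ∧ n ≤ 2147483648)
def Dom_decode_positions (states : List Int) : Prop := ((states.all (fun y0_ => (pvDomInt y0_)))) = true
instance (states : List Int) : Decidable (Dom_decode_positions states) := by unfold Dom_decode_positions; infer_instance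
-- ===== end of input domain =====

-- ===== PORT A =====
def decode_positions (states : List Int) : List Int × List Int × List Int × List Int :=
  let dest_loc := states.map (fun state => PySem.Int.mod state 4)
  let states1 := states.map (fun state => PySem.Int.floordiv state 4)
  let pass_code := states1.map (fun state => PySem.Int.mod state 5)
  let states2 := states1.map (fun state => PySem.Int.floordiv state 5)
  let taxi_col := states2.map (fun state => PySem.Int.mod state 5)
  let states3 := states2.map (fun state => PySem.Int.floordiv state 5)
  let taxi_row := states3
  (taxi_row, taxi_col, pass_code, dest_loc)

-- ===== PORT B =====
-- single pass: decode each state fully with divmod, appending to four accumulators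
def decode_positions_alt (states : List Int) : List Int × List Int × List Int × List Int :=
  let acc := states.foldl (fun (acc : List Int × List Int × List Int × List Int) s =>
    let (rows, cols, passes, dests) := acc
    let s1 := PySem.Int.floordiv s 4
    let d := PySem.Int.mod s 4
    let s2 := PySem.Int.floordiv s1 5
    let p := PySem.Int.mod s1 5
    let s3 := PySem.Int.floordiv s2 5
    let c := PySem.Int.mod s2 5
    (rows ++ [s3], cols ++ [c], passes ++ [p], dests ++ [d])) ([], [], [], [])
  acc

-- ===== PRECONDITION & SPEC =====
def Spec_decode_positions (states : List Int) (out : List Int × List Int × List Int × List Int) : Prop := out = decode_positions_alt states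
instance (states : List Int) (out : List Int × List Int × List Int × List Int) : Decidable (Spec_decode_positions states out) := by unfold Spec_decode_positions; infer_instance

-- ===== CLAIM (what is proved, stated in full; the proofs are below) =====
def Claim_equal_decode_positions : Prop := ∀ (states : List Int), Dom_decode_positions states → Spec_decode_positions states (decode_positions states)

-- ===== LEMMAS AND PROOFS =====

-- ===== VERDICT (by name: the statement is the Claim_ definition above) =====
theorem alt_foldl (states : List Int) (r c p d : List Int) :
    states.foldl (fun (acc : List Int × List Int × List Int × List Int) s =>
      (acc.1 ++ [PySem.Int.floordiv (PySem.Int.floordiv (PySem.Int.floordiv s 4) 5) 5],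
       acc.2.1 ++ [PySem.Int.mod (PySem.Int.floordiv (PySem.Int.floordiv s 4) 5) 5],
       acc.2.2.1 ++ [PySem.Int.mod (PySem.Int.floordiv s 4) 5],
       acc.2.2.2 ++ [PySem.Int.mod s 4])) (r, c, p, d)
    = (r ++ states.map (fun s => PySem.Int.floordiv (PySem.Int.floordiv (PySem.Int.floordiv s 4) 5) 5),
       c ++ states.map (fun s => PySem.Int.mod (PySem.Int.floordiv (PySem.Int.floordiv s 4) 5) 5),
       p ++ states.map (fun s => PySem.Int.mod (PySem.Int.floordiv s 4) 5),
       d ++ states.map (fun s => PySem.Int.mod s 4)) := by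
  induction states generalizing r c p d with
  | nil => simp
  | cons x xs ih => rw [List.foldl_cons, ih]; simp

theorem decode_positions_spec : Claim_equal_decode_positions := by
  intro states _
  unfold Spec_decode_positions decode_positions decode_positions_alt
  simp only [List.map_map]
  rw [alt_foldl]
  simp [Function.comp]
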